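-- pv_equiv track=rewrite | github.com/jlevis10/5698-Final | main.py | update_node_ages
-- ===== SOURCE A (Python) =====
-- from copy import deepcopy
--
-- def update_node_ages(node_ages, path1, path2):
--     # first update from path1:
--     time_step1 = len(path1)
--     time_step2 = len(path2)
--     p1r = deepcopy(path1)
--     p1r.reverse()
--     p2r = deepcopy(path2)
--     p2r.reverse()
--
--     for node in node_ages.keys():
--         if node in path1:
--             node_ages[node] = p1r.index(node)
--         elif node in path2:
--             node_ages[node] = min(node_ages[node],p2r.index(node))
--         else:
--             node_ages[node] = node_ages[node] + max(time_step1,time_step2)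
--
--     return node_ages
-- ===== SOURCE B (Python) =====
-- def update_node_ages(node_ages, path1, path2):
--     n1, n2 = len(path1), len(path2)
--     orig = dict(node_ages)
--     # age everyone by the larger path length
--     for k in node_ages:
--         node_ages[k] += max(n1, n2)
--     # sweep path2 forward: each occurrence writes min(original age, distance-from-end);
--     # later occurrences overwrite, so the last one wins (= .index on the reversed path)
--     for i, n in enumerate(path2):
--         if n in node_ages:
--             node_ages[n] = min(orig[n], n2 - 1 - i)
--     # sweep path1 forward last, so path1 wins over path2
--     for i, n in enumerate(path1):
--         if n in node_ages:
--             node_ages[n] = n1 - 1 - i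
--     return node_ages
-- ===== Notes on version B (the rewrite author's own statement) =====
-- stated objective: alternative
-- what changed: Instead of A's loop over dict keys with per-key membership scans and reversed-list .index calls, B bulk-ages the dict once and then sweeps path2 and path1 forward, each occurrence overwriting the node's age with its distance from the path end so the last occurrence wins (equal to .index on the reversed path), path1 swept last so it takes precedence.
import Mathlib
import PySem

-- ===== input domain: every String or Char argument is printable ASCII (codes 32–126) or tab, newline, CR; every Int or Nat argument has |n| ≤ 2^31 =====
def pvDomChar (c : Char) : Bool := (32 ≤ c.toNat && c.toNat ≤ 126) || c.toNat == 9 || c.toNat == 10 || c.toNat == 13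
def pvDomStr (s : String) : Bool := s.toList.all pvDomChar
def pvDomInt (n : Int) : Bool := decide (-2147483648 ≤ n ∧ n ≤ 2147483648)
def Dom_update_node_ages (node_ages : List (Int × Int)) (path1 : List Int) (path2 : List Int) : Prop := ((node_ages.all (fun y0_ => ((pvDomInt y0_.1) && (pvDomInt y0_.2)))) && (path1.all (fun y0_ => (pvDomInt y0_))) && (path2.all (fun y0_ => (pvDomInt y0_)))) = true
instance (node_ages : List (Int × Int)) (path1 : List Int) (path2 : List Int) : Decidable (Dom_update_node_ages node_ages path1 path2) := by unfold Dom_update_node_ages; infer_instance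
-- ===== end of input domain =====

-- B replaces A's keys-loop (per-key `in path` scans and reversed-list .index calls) by one bulk aging
-- pass plus two forward sweeps over path2 then path1, each occurrence overwriting with its distance
-- from the path end (last occurrence wins = .index on the reversed path); path1 swept last wins.
-- Both A and B mutate the dict in place the same way; the theorem is about the returned value.

-- ===== PORT A =====
def update_node_ages (node_ages : List (Int × Int)) (path1 : List Int) (path2 : List Int) : List (Int × Int) :=
  let time_step1 : Int := path1.length
  let time_step2 : Int := path2.length
  let p1r : List Int := path1.reverse
  let p2r : List Int := path2.reverse
  let d0 : PySem.Dict Int Int := PySem.Dict.ofList node_ages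
  -- for node in node_ages.keys(): … (p1r.index/p2r.index and node_ages[node] are guarded by the
  -- branch conditions / key membership, so the `.getD 0` defaults are never taken: exact)
  (d0.keys.foldl (fun d node =>
      if node ∈ path1 then
        d.insert node (((PySem.List.index? p1r node).getD 0 : Nat) : Int)
      else if node ∈ path2 then
        d.insert node (min (d.getD node 0) (((PySem.List.index? p2r node).getD 0 : Nat) : Int))
      else
        d.insert node (d.getD node 0 + max time_step1 time_step2)) d0).items

-- ===== PORT B =====
def update_node_ages_alt (node_ages : List (Int × Int)) (path1 : List Int) (path2 : List Int) : List (Int × Int) :=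
  let n1 : Int := path1.length
  let n2 : Int := path2.length
  let orig : PySem.Dict Int Int := PySem.Dict.ofList node_ages
  -- bulk pass: age everything by the larger path length
  let d1 := orig.keys.foldl (fun d k => d.insert k (d.getD k 0 + max n1 n2)) orig
  -- sweep path2 forward; later occurrences overwrite (orig[n] is guarded by the membership test: exact)
  let d2 := (PySem.List.enumerate path2).foldl
      (fun d p => if d.contains p.2 then d.insert p.2 (min (orig.getD p.2 0) (n2 - 1 - p.1)) else d) d1
  -- sweep path1 forward last, so path1 wins over path2
  let d3 := (PySem.List.enumerate path1).foldl
      (fun d p => if d.contains p.2 then d.insert p.2 (n1 - 1 - p.1) else d) d2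
  d3.items

-- ===== PRECONDITION & SPEC =====
def Spec_update_node_ages (node_ages : List (Int × Int)) (path1 : List Int) (path2 : List Int) (out : List (Int × Int)) : Prop := out = update_node_ages_alt node_ages path1 path2
instance (node_ages : List (Int × Int)) (path1 : List Int) (path2 : List Int) (out : List (Int × Int)) : Decidable (Spec_update_node_ages node_ages path1 path2 out) := by unfold Spec_update_node_ages; infer_instance

-- ===== CLAIM (what is proved, stated in full; the proofs are below) =====
def Claim_equal_update_node_ages : Prop := ∀ (node_ages : List (Int × Int)) (path1 : List Int) (path2 : List Int), Dom_update_node_ages node_ages path1 path2 → Spec_update_node_ages node_ages path1 path2 (update_node_ages node_ages path1 path2)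

-- ===== LEMMAS AND PROOFS =====

-- index (from the front) of the LAST occurrence of k in cs
def lastIdx? (cs : List Int) (k : Int) : Option Nat :=
  match cs with
  | [] => none
  | c :: cs => match lastIdx? cs k with
    | some j => some (j + 1)
    | none => if c = k then some 0 else none

-- lastIdx? is .index on the reversed list, re-counted from the front
lemma lastIdx?_eq : ∀ (cs : List Int) (k : Int),
    lastIdx? cs k = (PySem.List.index? cs.reverse k).map (fun j => cs.length - 1 - j) := by
  intro cs
  induction cs with
  | nil => intro k; simp [lastIdx?, PySem.List.index?]
  | cons c cs ih =>
    intro k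
    rw [List.reverse_cons]
    by_cases hm : k ∈ cs
    · have hm' : k ∈ cs.reverse := by simpa using hm
      rw [PySem.List.index?_append_of_mem [c] hm']
      obtain ⟨j, hj⟩ := Option.isSome_iff_exists.mp
        ((PySem.List.index?_isSome_iff cs.reverse k).mpr hm')
      obtain ⟨hjlt, -, -⟩ := PySem.List.getElem_of_index?_eq_some hj
      have hjlt' : j < cs.length := by simpa using hjlt
      simp only [lastIdx?, ih, hj, Option.map_some, List.length_cons]
      congr 1
      omega
    · have hnone : List.idxOf? k cs.reverse = none :=
        List.idxOf?_eq_none_iff.mpr (by simpa using hm)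
      by_cases hck : c = k
      · subst hck
        rw [PySem.List.index?_append_singleton_self cs.reverse c (by simpa using hm)]
        simp [lastIdx?, ih, hnone]
      · have hnone2 : List.idxOf? k (cs.reverse ++ [c]) = none :=
          List.idxOf?_eq_none_iff.mpr (by simp [hm, Ne.symm hck])
        simp [lastIdx?, ih, hnone, hnone2, hck]

-- A keys-loop that rewrites each (present) key once, reading its current value.
lemma fold_keys_insert (F : Int → Int → Int)
    (step : PySem.Dict Int Int → Int → PySem.Dict Int Int)
    (hstep : ∀ d k, step d k = d.insert k (F k (d.getD k 0))) :
    ∀ (ks : List Int) (d : PySem.Dict Int Int), ks.Nodup → d.keys.Nodup →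
      (∀ k ∈ ks, d.contains k = true) →
      (ks.foldl step d).items
        = d.items.map (fun p => if p.1 ∈ ks then (p.1, F p.1 p.2) else p) := by
  intro ks
  induction ks with
  | nil => intro d _ _ _; simp
  | cons k ks ih =>
    intro d hnd hkeys hcont
    rw [List.foldl_cons, hstep]
    have hck : d.contains k = true := hcont k (by simp)
    have hitems := PySem.Dict.items_insert_of_contains d (F k (d.getD k 0)) hck
    have hkeys' : (d.insert k (F k (d.getD k 0))).keys.Nodup :=
      PySem.Dict.nodup_keys_insert _ _ _ hkeys
    have hcont' : ∀ k' ∈ ks, (d.insert k (F k (d.getD k 0))).contains k' = true := by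
      intro k' hk'
      rw [PySem.Dict.contains_insert]
      simp [hcont k' (by simp [hk'])]
    rw [ih _ hnd.of_cons hkeys' hcont', hitems, List.map_map]
    refine List.map_congr_left ?_
    intro p hp
    by_cases hpk : p.1 = k
    · have hk_notin : k ∉ ks := (List.nodup_cons.mp hnd).1
      have hgd : d.getD k 0 = p.2 := by
        have : (k, p.2) ∈ d.items := by rwa [← hpk]
        exact PySem.Dict.getD_of_mem_items d this hkeys 0
      simp [Function.comp, hpk, hk_notin, hgd]
    · simp [Function.comp, hpk, show (p.1 == k) = false by simp [hpk]]

-- A forward enumerate-sweep that conditionally overwrites present keys; the LAST occurrence wins.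
lemma fold_enum_lastwins (G : Int → Int → Int)
    (step : PySem.Dict Int Int → Int × Int → PySem.Dict Int Int)
    (hstep : ∀ d p, step d p = if d.contains p.2 then d.insert p.2 (G p.1 p.2) else d) :
    ∀ (cs : List Int) (i0 : Int) (d : PySem.Dict Int Int), d.keys.Nodup →
      ((PySem.List.enumerate cs i0).foldl step d).items
        = d.items.map (fun q => match lastIdx? cs q.1 with
            | some j => (q.1, G (i0 + j) q.1)
            | none => q) := by
  intro cs
  induction cs with
  | nil => intro i0 d _; simp [PySem.List.enumerate, lastIdx?]
  | cons c cs ih =>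
    intro i0 d hnd
    rw [PySem.List.enumerate_cons, List.foldl_cons, hstep]
    by_cases hc : d.contains c = true
    · simp only [hc, if_true]
      rw [ih (i0 + 1) _ (PySem.Dict.nodup_keys_insert _ _ _ hnd),
          PySem.Dict.items_insert_of_contains d _ hc, List.map_map]
      refine List.map_congr_left ?_
      rintro ⟨k0, v0⟩ hq
      by_cases hqc : k0 = c
      · subst hqc
        cases hl : lastIdx? cs k0 with
        | some j =>
          simp only [Function.comp, beq_self_eq_true, if_true, lastIdx?, hl]
          have hcast : i0 + 1 + (j : Int) = i0 + ((j + 1 : Nat) : Int) := by push_cast; ring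
          rw [hcast]
        | none => simp [Function.comp, lastIdx?, hl]
      · have hb : (k0 == c) = false := by simp [hqc]
        cases hl : lastIdx? cs k0 with
        | some j =>
          simp only [Function.comp, hb, Bool.false_eq_true, if_false, lastIdx?, hl]
          have hcast : i0 + 1 + (j : Int) = i0 + ((j + 1 : Nat) : Int) := by push_cast; ring
          rw [hcast]
        | none => simp [Function.comp, hb, lastIdx?, hl, Ne.symm hqc]
    · simp only [hc, if_false, Bool.false_eq_true]
      rw [ih (i0 + 1) _ hnd]
      refine List.map_congr_left ?_
      rintro ⟨k0, v0⟩ hq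
      have hqc : k0 ≠ c := by
        rintro rfl
        exact hc ((PySem.Dict.contains_iff_mem_keys _ _).mpr
          (List.mem_map.mpr ⟨(k0, v0), hq, rfl⟩))
      cases hl : lastIdx? cs k0 with
      | some j =>
        simp only [lastIdx?, hl]
        have hcast : i0 + 1 + (j : Int) = i0 + ((j + 1 : Nat) : Int) := by push_cast; ring
        rw [hcast]
      | none => simp [lastIdx?, hl, Ne.symm hqc]

-- ===== VERDICT (by name: the statement is the Claim_ definition above) =====
theorem update_node_ages_spec : Claim_equal_update_node_ages := by
  unfold Claim_equal_update_node_ages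
  intro na path1 path2 _
  simp only [Spec_update_node_ages, update_node_ages, update_node_ages_alt]
  set d0 := PySem.Dict.ofList na with hd0def
  set d1 := d0.keys.foldl
      (fun d k => d.insert k (d.getD k 0 + max (path1.length : Int) (path2.length : Int))) d0 with hd1def
  set d2 := (PySem.List.enumerate path2).foldl
      (fun d p => if d.contains p.2 then
          d.insert p.2 (min (d0.getD p.2 0) ((path2.length : Int) - 1 - p.1)) else d) d1 with hd2def
  have hnodup0 : d0.keys.Nodup := PySem.Dict.nodup_keys_ofList na
  have hcont0 : ∀ k ∈ d0.keys, d0.contains k = true :=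
    fun k hk => (PySem.Dict.contains_iff_mem_keys _ k).mpr hk
  have keys_map : ∀ (d d' : PySem.Dict Int Int) (f : Int × Int → Int × Int),
      d'.items = d.items.map f → (∀ p ∈ d.items, (f p).1 = p.1) → d'.keys = d.keys := by
    intro d d' f h hf
    simp only [PySem.Dict.keys, h, List.map_map]
    exact List.map_congr_left (fun p hp => hf p hp)
  have hd1items : d1.items = d0.items.map
      (fun p => if p.1 ∈ d0.keys then (p.1, p.2 + max (path1.length : Int) (path2.length : Int)) else p) := by
    rw [hd1def]
    exact fold_keys_insert (fun k v => v + max (path1.length : Int) (path2.length : Int))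
      (fun d k => d.insert k (d.getD k 0 + max (path1.length : Int) (path2.length : Int)))
      (fun d k => rfl) d0.keys d0 hnodup0 hnodup0 hcont0
  have hd1keys : d1.keys = d0.keys :=
    keys_map _ _ _ hd1items (by intro p hp; split_ifs <;> rfl)
  have hd1nodup : d1.keys.Nodup := hd1keys ▸ hnodup0
  have hd2items : d2.items = d1.items.map
      (fun q => match lastIdx? path2 q.1 with
        | some j => (q.1, min (d0.getD q.1 0) ((path2.length : Int) - 1 - (0 + j)))
        | none => q) := by
    rw [hd2def]
    exact fold_enum_lastwins (fun i n => min (d0.getD n 0) ((path2.length : Int) - 1 - i))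
      (fun d p => if d.contains p.2 then
          d.insert p.2 (min (d0.getD p.2 0) ((path2.length : Int) - 1 - p.1)) else d)
      (fun d p => rfl) path2 0 d1 hd1nodup
  have hd2keys : d2.keys = d1.keys := by
    refine keys_map _ _ _ hd2items ?_
    intro q hq
    cases lastIdx? path2 q.1 <;> rfl
  have hd2nodup : d2.keys.Nodup := hd2keys ▸ hd1nodup
  rw [fold_enum_lastwins (fun i n => (path1.length : Int) - 1 - i)
      (fun d p => if d.contains p.2 then d.insert p.2 ((path1.length : Int) - 1 - p.1) else d)
      (fun d p => rfl) path1 0 d2 hd2nodup]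
  rw [fold_keys_insert
      (fun k v => if k ∈ path1 then (((PySem.List.index? path1.reverse k).getD 0 : Nat) : Int)
        else if k ∈ path2 then min v (((PySem.List.index? path2.reverse k).getD 0 : Nat) : Int)
        else v + max (path1.length : Int) (path2.length : Int))
      (fun d node => if node ∈ path1 then d.insert node (((PySem.List.index? path1.reverse node).getD 0 : Nat) : Int)
        else if node ∈ path2 then d.insert node (min (d.getD node 0) (((PySem.List.index? path2.reverse node).getD 0 : Nat) : Int))
        else d.insert node (d.getD node 0 + max (path1.length : Int) (path2.length : Int)))
      (by intro d k; dsimp only; split_ifs <;> rfl) d0.keys d0 hnodup0 hnodup0 hcont0]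
  rw [hd2items, hd1items, List.map_map, List.map_map]
  refine List.map_congr_left ?_
  rintro ⟨k, v⟩ hp
  have hmemkeys : k ∈ d0.keys := List.mem_map.mpr ⟨(k, v), hp, rfl⟩
  have hgd : d0.getD k 0 = v := PySem.Dict.getD_of_mem_items d0 hp hnodup0 0
  by_cases h1 : k ∈ path1
  · obtain ⟨j1, hj1⟩ := Option.isSome_iff_exists.mp
      ((PySem.List.index?_isSome_iff path1.reverse k).mpr (List.mem_reverse.mpr h1))
    obtain ⟨hj1lt, -, -⟩ := PySem.List.getElem_of_index?_eq_some hj1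
    have hj1lt' : j1 < path1.length := by simpa using hj1lt
    have hl1 : lastIdx? path1 k = some (path1.length - 1 - j1) := by
      rw [lastIdx?_eq, hj1]; rfl
    have hj1' : List.idxOf? k path1.reverse = some j1 := by simpa using hj1
    have hval : (path1.length : Int) - 1 - ((path1.length - 1 - j1 : Nat) : Int)
        = ((j1 : Nat) : Int) := by omega
    by_cases h2 : k ∈ path2
    · obtain ⟨j2, hj2⟩ := Option.isSome_iff_exists.mp
        ((PySem.List.index?_isSome_iff path2.reverse k).mpr (List.mem_reverse.mpr h2))
      obtain ⟨hj2lt, -, -⟩ := PySem.List.getElem_of_index?_eq_some hj2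
      have hl2 : lastIdx? path2 k = some (path2.length - 1 - j2) := by
        rw [lastIdx?_eq, hj2]; rfl
      simp [Function.comp, hmemkeys, h1, hj1', hl1, hl2, hval]
    · have hl2 : lastIdx? path2 k = none := by
        rw [lastIdx?_eq, (PySem.List.index?_eq_none_iff path2.reverse k).mpr (by simpa using h2)]
        rfl
      simp [Function.comp, hmemkeys, h1, hj1', hl1, hl2, hval]
  · have hl1 : lastIdx? path1 k = none := by
      rw [lastIdx?_eq, (PySem.List.index?_eq_none_iff path1.reverse k).mpr (by simpa using h1)]
      rfl
    by_cases h2 : k ∈ path2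
    · obtain ⟨j2, hj2⟩ := Option.isSome_iff_exists.mp
        ((PySem.List.index?_isSome_iff path2.reverse k).mpr (List.mem_reverse.mpr h2))
      obtain ⟨hj2lt, -, -⟩ := PySem.List.getElem_of_index?_eq_some hj2
      have hj2lt' : j2 < path2.length := by simpa using hj2lt
      have hl2 : lastIdx? path2 k = some (path2.length - 1 - j2) := by
        rw [lastIdx?_eq, hj2]; rfl
      have hj2' : List.idxOf? k path2.reverse = some j2 := by simpa using hj2
      have hval : (path2.length : Int) - 1 - ((path2.length - 1 - j2 : Nat) : Int)
          = ((j2 : Nat) : Int) := by omega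
      simp [Function.comp, hmemkeys, h1, h2, hj2', hl1, hl2, hgd, hval]
    · have hl2 : lastIdx? path2 k = none := by
        rw [lastIdx?_eq, (PySem.List.index?_eq_none_iff path2.reverse k).mpr (by simpa using h2)]
        rfl
      simp [Function.comp, hmemkeys, h1, h2, hl1, hl2]
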